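-- pv_equiv track=rewrite | github.com/dna-storage/framed | dnastorage/codec/builder/norepeats.py | _makeNoRepeatStrandsHelper
-- ===== SOURCE A (Python) =====
-- def _makeNoRepeatStrandsHelper(oList,allowedRepeats=0):
--     nList = []
--     for o in oList:
--         for b in ['A', 'C', 'G', 'T']:
--             copy = [ _ for _ in o ]
--             copy.append(b)
--             if repetition(copy)<=allowedRepeats:
--                 nList.append("".join(copy))
--     return nList
--
-- def repetition(s,verbose=False):
--     r = sum([ int(a==b) for a,b in zip([_ for _ in s[:-1]],[_ for _ in s[1:]]) ])
--     if verbose: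
--         zipped = zip([_ for _ in s[:-1]],[_ for _ in s[1:]])
--         idx = [ int(a==b) for a,b in zipped ]
--         ss =  " "
--         for i,x in enumerate(idx):
--             if x==1:
--                 ss = ss+'^'
--             else:
--                 ss = ss+' '
--         print (s)
--         print (ss)
--     return r
-- ===== SOURCE B (Python) =====
-- def _makeNoRepeatStrandsHelper(oList, allowedRepeats=0):
--     nList = []
--     for o in oList:
--         # one running-accumulator scan: count of adjacent equal pairs in o
--         base = 0
--         prev = None
--         for c in o:
--             if c == prev:
--                 base += 1
--             prev = c
--         # decide the admissible extension alphabet by case analysis,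
--         # instead of testing each candidate strand:
--         #   budget left  -> every base is fine
--         #   budget exact -> every base except a repeat of the last character
--         #   over budget  -> none
--         if not o or base + 1 <= allowedRepeats:
--             bases = 'ACGT' if base <= allowedRepeats else ''
--         elif base == allowedRepeats:
--             bases = 'ACGT'.replace(o[-1], '')
--         else:
--             bases = ''
--         nList.extend(o + b for b in bases)
--     return nList
-- ===== Notes on version B (the rewrite author's own statement) =====
-- stated objective: faster
-- what changed: B replaces A's generate-and-test inner loop (build each of the four extended strands as a list and rescan it with repetition()) by one running-accumulator scan per strand followed by a case analysis that directly constructs the admissible extension alphabet (all of ACGT / ACGT minus the last character / none) and extends with it; no per-candidate strand is ever built or rescanned.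
import Mathlib
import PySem

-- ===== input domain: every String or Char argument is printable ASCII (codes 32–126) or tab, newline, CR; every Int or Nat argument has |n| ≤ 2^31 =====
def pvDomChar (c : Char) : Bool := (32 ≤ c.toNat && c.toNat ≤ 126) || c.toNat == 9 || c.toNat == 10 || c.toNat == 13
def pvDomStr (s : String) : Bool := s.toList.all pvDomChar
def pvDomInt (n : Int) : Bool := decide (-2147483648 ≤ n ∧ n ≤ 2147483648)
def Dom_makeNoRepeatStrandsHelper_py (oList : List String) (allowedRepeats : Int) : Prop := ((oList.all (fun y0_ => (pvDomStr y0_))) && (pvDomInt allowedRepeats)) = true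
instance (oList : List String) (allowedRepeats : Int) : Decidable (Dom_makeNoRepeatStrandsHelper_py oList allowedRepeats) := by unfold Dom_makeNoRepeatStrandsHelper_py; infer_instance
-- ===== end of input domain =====

-- B replaces A's generate-and-test inner loop by one accumulator scan per strand plus a case
-- analysis that constructs the admissible extension alphabet directly (neither version mutates
-- its arguments).

-- ===== PORT A =====
-- repetition(s): sum of int(a==b) over zip(s[:-1], s[1:])
def repetition_py (s : List Char) : Int :=
  (((PySem.List.slice s none (some (-1))).zip (PySem.List.slice s (some 1) none)).map
    (fun p => if p.1 == p.2 then (1 : Int) else 0)).sum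

def makeNoRepeatStrandsHelper_py (oList : List String) (allowedRepeats : Int) : List String :=
  oList.foldl (fun nList o =>
    (['A', 'C', 'G', 'T'] : List Char).foldl (fun nList b =>
      let copy := o.toList ++ [b]
      if repetition_py copy ≤ allowedRepeats then nList ++ [String.ofList copy] else nList)
      nList) []

-- ===== PORT B =====
def makeNoRepeatStrandsHelper_py_alt (oList : List String) (allowedRepeats : Int) : List String :=
  oList.foldl (fun nList o =>
    -- base = 0; prev = None; for c in o: base += (c == prev); prev = c
    let st := o.toList.foldl
      (fun (p : Int × Option Char) c => ((if some c == p.2 then p.1 + 1 else p.1), some c))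
      (0, none)
    let base := st.1
    let bases : List Char :=
      if o.toList.isEmpty || base + 1 ≤ allowedRepeats then
        (if base ≤ allowedRepeats then ['A', 'C', 'G', 'T'] else [])
      else if base == allowedRepeats then
        -- 'ACGT'.replace(o[-1], '') : the 4-char literal with o's last character removed
        (['A', 'C', 'G', 'T'] : List Char).filter (fun b => !(some b == o.toList.getLast?))
      else []
    nList ++ bases.map (fun b => o.push b)) []

-- ===== PRECONDITION & SPEC =====
def Spec_makeNoRepeatStrandsHelper_py (oList : List String) (allowedRepeats : Int) (out : List String) : Prop := out = makeNoRepeatStrandsHelper_py_alt oList allowedRepeats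
instance (oList : List String) (allowedRepeats : Int) (out : List String) : Decidable (Spec_makeNoRepeatStrandsHelper_py oList allowedRepeats out) := by unfold Spec_makeNoRepeatStrandsHelper_py; infer_instance

-- ===== CLAIM (what is proved, stated in full; the proofs are below) =====
def Claim_equal_makeNoRepeatStrandsHelper_py : Prop := ∀ (oList : List String) (allowedRepeats : Int), Dom_makeNoRepeatStrandsHelper_py oList allowedRepeats → Spec_makeNoRepeatStrandsHelper_py oList allowedRepeats (makeNoRepeatStrandsHelper_py oList allowedRepeats)

-- ===== LEMMAS AND PROOFS =====

-- canonical adjacent-repeat count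
def adjRep : List Char → Int
  | [] => 0
  | [_] => 0
  | x :: y :: t => (if x == y then 1 else 0) + adjRep (y :: t)

-- adjacent repeats continuing from an optional previous character (B's accumulator shape)
def adjFrom (prev : Option Char) : List Char → Int
  | [] => 0
  | c :: t => (if some c == prev then 1 else 0) + adjFrom (some c) t

lemma repetition_eq_adjRep (s : List Char) : repetition_py s = adjRep s := by
  induction s using adjRep.induct with
  | case1 => simp [repetition_py, adjRep, PySem.List.slice_to_neg_one, PySem.List.slice_from_one]
  | case2 x => simp [repetition_py, adjRep, PySem.List.slice_to_neg_one, PySem.List.slice_from_one]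
  | case3 x y t ih =>
      simp only [repetition_py, PySem.List.slice_to_neg_one, PySem.List.slice_from_one,
        List.tail_cons] at ih ⊢
      rw [List.dropLast_cons₂, List.zip_cons_cons, List.map_cons, List.sum_cons, ih,
        show adjRep (x :: y :: t) = (if x == y then 1 else 0) + adjRep (y :: t) from rfl]

lemma fold_fst_eq_adjFrom (s : List Char) : ∀ (acc : Int) (prev : Option Char),
    (s.foldl
      (fun (p : Int × Option Char) c => ((if some c == p.2 then p.1 + 1 else p.1), some c))
      (acc, prev)).1 = acc + adjFrom prev s := by
  induction s with
  | nil => intro acc prev; simp [adjFrom]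
  | cons c t ih =>
      intro acc prev
      simp only [List.foldl_cons, adjFrom, ih]
      split_ifs <;> ring

lemma adjFrom_some (c : Char) (t : List Char) :
    adjFrom (some c) t = (match t with | [] => 0 | y :: _ => if y == c then 1 else 0) + adjFrom none t := by
  cases t with
  | nil => simp [adjFrom]
  | cons y u => simp [adjFrom]

lemma adjFrom_none_eq_adjRep (s : List Char) : adjFrom none s = adjRep s := by
  induction s using adjRep.induct with
  | case1 => rfl
  | case2 x => simp [adjFrom, adjRep]
  | case3 x y t ih =>
      rw [show adjFrom none (x :: y :: t) = adjFrom (some x) (y :: t) by simp [adjFrom],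
        adjFrom_some, ih,
        show adjRep (x :: y :: t) = (if x == y then 1 else 0) + adjRep (y :: t) from rfl]
      rcases eq_or_ne x y with h | h
      · simp [h]
      · simp [h, Ne.symm h]

def extraOf (s : List Char) (b : Char) : Int :=
  match s.getLast? with | some c => if c == b then 1 else 0 | none => 0

lemma adjRep_append (s : List Char) (b : Char) :
    adjRep (s ++ [b]) = adjRep s + extraOf s b := by
  induction s using adjRep.induct with
  | case1 => simp [adjRep, extraOf]
  | case2 x => simp [adjRep, extraOf]
  | case3 x y t ih =>
      rw [show adjRep ((x :: y :: t) ++ [b]) = (if x == y then 1 else 0) + adjRep ((y :: t) ++ [b]) from rfl,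
        ih, show adjRep (x :: y :: t) = (if x == y then 1 else 0) + adjRep (y :: t) from rfl]
      simp only [extraOf, List.getLast?_cons_cons]
      ring

lemma push_eq_ofList (o : String) (b : Char) : o.push b = String.ofList (o.toList ++ [b]) := by
  rw [← String.toList_push, String.ofList_toList]

lemma extraOf_nonneg (s : List Char) (b : Char) : 0 ≤ extraOf s b := by
  unfold extraOf; rcases s.getLast? with _ | c
  · exact le_refl 0
  · dsimp only; split <;> omega

lemma extraOf_le_one (s : List Char) (b : Char) : extraOf s b ≤ 1 := by
  unfold extraOf; rcases s.getLast? with _ | c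
  · exact zero_le_one
  · dsimp only; split <;> omega

-- B's alphabet is exactly A's filter of ACGT by the candidate test
lemma bases_eq_filter (s : List Char) (r : Int) :
    (if s.isEmpty || adjRep s + 1 ≤ r then
        (if adjRep s ≤ r then (['A', 'C', 'G', 'T'] : List Char) else [])
      else if adjRep s == r then
        (['A', 'C', 'G', 'T'] : List Char).filter (fun b => !(some b == s.getLast?))
      else [])
    = (['A', 'C', 'G', 'T'] : List Char).filter (fun b => decide (adjRep s + extraOf s b ≤ r)) := by
  cases hL : s.getLast? with
  | none =>
      have hs : s = [] := List.getLast?_eq_none_iff.mp hL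
      subst hs
      by_cases h : (0 : Int) ≤ r <;>
        simp [adjRep, extraOf, List.filter, h]
  | some c =>
      have hs : s.isEmpty = false := by
        cases s with
        | nil => simp at hL
        | cons _ _ => rfl
      by_cases h1 : adjRep s + 1 ≤ r
      · have hall : ∀ b ∈ (['A', 'C', 'G', 'T'] : List Char),
            decide (adjRep s + extraOf s b ≤ r) = true := by
          intro b _
          have := extraOf_le_one s b
          simp; omega
        rw [List.filter_eq_self.mpr hall]
        simp [hs, h1]
        omega
      · by_cases h2 : adjRep s = r
        · have hcong : ∀ b ∈ (['A', 'C', 'G', 'T'] : List Char),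
              (!(some b == some c)) = decide (adjRep s + extraOf s b ≤ r) := by
            intro b _
            simp only [extraOf, hL]
            by_cases hbc : c = b
            · subst hbc
              simp
              omega
            · have hbc' : ¬ b = c := fun h => hbc h.symm
              have h1' : (some b == some c) = false := by simp [hbc']
              have h2' : (c == b) = false := by simp [hbc]
              rw [h1', h2']
              simp
              omega
          rw [List.filter_congr hcong]
          simp [hs, h2]
        · have hnone : ∀ b ∈ (['A', 'C', 'G', 'T'] : List Char),
              ¬ (decide (adjRep s + extraOf s b ≤ r) = true) := by
            intro b _
            have := extraOf_nonneg s b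
            simp; omega
          rw [List.filter_eq_nil_iff.mpr hnone]
          simp [hs, h2]
          omega

lemma inner_eq (o : String) (r : Int) (acc : List String) :
    (['A', 'C', 'G', 'T'] : List Char).foldl (fun nList b =>
        if repetition_py (o.toList ++ [b]) ≤ r
          then nList ++ [String.ofList (o.toList ++ [b])] else nList) acc
    = acc ++ ((if o.toList.isEmpty ||
          (o.toList.foldl
            (fun (p : Int × Option Char) c => ((if some c == p.2 then p.1 + 1 else p.1), some c))
            (0, none)).1 + 1 ≤ r then
          (if (o.toList.foldl
            (fun (p : Int × Option Char) c => ((if some c == p.2 then p.1 + 1 else p.1), some c))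
            (0, none)).1 ≤ r then (['A', 'C', 'G', 'T'] : List Char) else [])
        else if (o.toList.foldl
            (fun (p : Int × Option Char) c => ((if some c == p.2 then p.1 + 1 else p.1), some c))
            (0, none)).1 == r then
          (['A', 'C', 'G', 'T'] : List Char).filter (fun b => !(some b == o.toList.getLast?))
        else []).map (fun b => o.push b)) := by
  have hbase : (o.toList.foldl
      (fun (p : Int × Option Char) c => ((if some c == p.2 then p.1 + 1 else p.1), some c))
      (0, none)).1 = adjRep o.toList := by
    rw [fold_fst_eq_adjFrom, adjFrom_none_eq_adjRep, zero_add]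
  rw [hbase, bases_eq_filter]
  have hstep : (fun (nList : List String) (b : Char) =>
        if repetition_py (o.toList ++ [b]) ≤ r
          then nList ++ [String.ofList (o.toList ++ [b])] else nList)
      = (fun nList b => if adjRep o.toList + extraOf o.toList b ≤ r
          then nList ++ [o.push b] else nList) := by
    funext nList b
    rw [repetition_eq_adjRep, adjRep_append, push_eq_ofList]
  rw [hstep, PySem.List.foldl_append_ite]

-- ===== VERDICT (by name: the statement is the Claim_ definition above) =====
theorem makeNoRepeatStrandsHelper_py_spec : Claim_equal_makeNoRepeatStrandsHelper_py := by
  intro oList allowedRepeats _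
  unfold Spec_makeNoRepeatStrandsHelper_py makeNoRepeatStrandsHelper_py makeNoRepeatStrandsHelper_py_alt
  exact List.foldl_ext _ _ [] (fun acc o _ => inner_eq o allowedRepeats acc)
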